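-- pv_equiv track=rewrite | github.com/lyheiyu/Orcahand_gesture_correction | plot_classification_summary.py | _latest_per_feature
-- ===== SOURCE A (Python) =====
-- def _latest_per_feature(rows: list[dict[str, str]]) -> list[dict[str, str]]:
--     latest: dict[str, dict[str, str]] = {}
--     order: list[str] = []
--     for row in rows:
--         feature_set = row["feature_set"]
--         if feature_set not in latest:
--             order.append(feature_set)
--         latest[feature_set] = row
--     return [latest[feature_set] for feature_set in order]
-- ===== SOURCE B (Python) =====
-- def _latest_per_feature(rows: list[dict[str, str]]) -> list[dict[str, str]]:
--     out = []
--     seen = []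
--     for row in rows:
--         key = row["feature_set"]
--         if key not in seen:
--             seen.append(key)
--             last = row
--             for r in rows:
--                 if r["feature_set"] == key:
--                     last = r
--             out.append(last)
--     return out
-- ===== Notes on version B (the rewrite author's own statement) =====
-- stated objective: alternative
-- what changed: Replaces the dict entirely: for each key at its first occurrence, a direct inner scan over all rows picks the last row with that key (brute-force nested scan instead of a hash map kept up to date).
import Mathlib
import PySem

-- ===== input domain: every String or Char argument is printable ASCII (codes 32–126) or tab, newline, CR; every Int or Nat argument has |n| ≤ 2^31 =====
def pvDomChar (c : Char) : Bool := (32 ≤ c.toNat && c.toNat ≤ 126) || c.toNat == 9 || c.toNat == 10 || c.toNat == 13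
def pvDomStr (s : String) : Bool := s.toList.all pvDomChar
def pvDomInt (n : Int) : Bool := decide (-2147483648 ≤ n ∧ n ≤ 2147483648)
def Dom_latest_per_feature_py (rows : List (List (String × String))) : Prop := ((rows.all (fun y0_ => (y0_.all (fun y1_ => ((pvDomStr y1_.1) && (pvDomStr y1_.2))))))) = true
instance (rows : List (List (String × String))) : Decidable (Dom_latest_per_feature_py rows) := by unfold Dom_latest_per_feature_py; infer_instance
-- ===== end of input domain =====

-- B drops the dict entirely: at each key's first occurrence it scans all rows for the last row with that key (nested scan instead of a hash map); same results, different algorithm, not faster.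

-- ===== PORT A =====
-- row["feature_set"]: first match in the association list; Pre_ guarantees the key is present, so the `getD ""` default is never reached inside Pre_.
def pvFs (row : List (String × String)) : String := (row.lookup "feature_set").getD ""

def latest_per_feature_py (rows : List (List (String × String))) : List (List (String × String)) :=
  let st := rows.foldl
    (fun (st : PySem.Dict String (List (String × String)) × List String) row =>
      let fs := pvFs row
      let order := if st.1.contains fs then st.2 else st.2 ++ [fs]
      (st.1.insert fs row, order))
    (PySem.Dict.empty, [])
  st.2.map (fun fs => st.1.getD fs [])

-- ===== PORT B =====
def latest_per_feature_py_alt (rows : List (List (String × String))) : List (List (String × String)) :=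
  (rows.foldl
    (fun (st : List (List (String × String)) × List String) row =>
      let key := pvFs row
      if st.2.contains key then st
      else (st.1 ++ [rows.foldl (fun last r => if pvFs r == key then r else last) row],
            st.2 ++ [key]))
    ([], [])).1

-- ===== PRECONDITION & SPEC =====
-- Pre_ excludes exactly the rows missing the "feature_set" key, on which the Python A raises KeyError.
def Pre_latest_per_feature_py (rows : List (List (String × String))) : Prop :=
  (rows.all (fun row => (row.map Prod.fst).contains "feature_set")) = true
instance (rows : List (List (String × String))) : Decidable (Pre_latest_per_feature_py rows) := by unfold Pre_latest_per_feature_py; infer_instance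
def pvWitness_latest_per_feature_py : (List (List (String × String))) :=
  [[("feature_set", "a"), ("acc", "1")], [("feature_set", "a"), ("acc", "2")], [("feature_set", "b")]]

def Spec_latest_per_feature_py (rows : List (List (String × String))) (out : List (List (String × String))) : Prop := out = latest_per_feature_py_alt rows
instance (rows : List (List (String × String))) (out : List (List (String × String))) : Decidable (Spec_latest_per_feature_py rows out) := by unfold Spec_latest_per_feature_py; infer_instance

-- ===== CLAIM (what is proved, stated in full; the proofs are below) =====
def Claim_equal_latest_per_feature_py : Prop := ∀ (rows : List (List (String × String))), Dom_latest_per_feature_py rows → Pre_latest_per_feature_py rows → Spec_latest_per_feature_py rows (latest_per_feature_py rows)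

-- ===== LEMMAS AND PROOFS =====

-- the last row in `rows` whose feature_set is k, if any
def pvLast? (k : String) : List (List (String × String)) → Option (List (String × String))
  | [] => none
  | r :: rs =>
    match pvLast? k rs with
    | some x => some x
    | none => if pvFs r == k then some r else none

-- the value A's dict ends up holding at key k (and the value B's inner scan finds)
def pvG (rows : List (List (String × String))) (k : String) : List (String × String) :=
  match pvLast? k rows with
  | some x => x
  | none => []

theorem pv_foldl_last (k : String) (rows : List (List (String × String))) :
    ∀ (a : List (String × String)),
    rows.foldl (fun last r => if pvFs r == k then r else last) a
      = match pvLast? k rows with | some x => x | none => a := by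
  induction rows with
  | nil => intro a; rfl
  | cons r rs ih =>
    intro a
    simp only [List.foldl_cons, ih, pvLast?]
    cases pvLast? k rs with
    | some x => rfl
    | none => by_cases h : pvFs r == k <;> simp [h]

theorem pv_last_isSome (rows : List (List (String × String))) (r : List (String × String))
    (h : r ∈ rows) : (pvLast? (pvFs r) rows).isSome := by
  induction rows with
  | nil => cases h
  | cons x xs ih =>
    simp only [pvLast?]
    cases hx : pvLast? (pvFs r) xs with
    | some y => rfl
    | none =>
      rcases List.mem_cons.mp h with h1 | h2
      · subst h1; simp
      · have := ih h2; rw [hx] at this; simp at this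

-- A's `order` list is exactly the key list of its dict, and its dict is the foldl-insert dict.
theorem pv_loop_inv (rows : List (List (String × String)))
    (d : PySem.Dict String (List (String × String))) (ord : List String)
    (h : d.keys = ord) :
    (rows.foldl
      (fun (st : PySem.Dict String (List (String × String)) × List String) row =>
        let fs := pvFs row
        let order := if st.1.contains fs then st.2 else st.2 ++ [fs]
        (st.1.insert fs row, order))
      (d, ord))
    = (rows.foldl (fun d row => d.insert (pvFs row) row) d,
       (rows.foldl (fun d row => d.insert (pvFs row) row) d).keys) := by
  induction rows generalizing d ord with
  | nil => simp [h]
  | cons r rs ih =>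
    simp only [List.foldl_cons]
    by_cases hc : d.contains (pvFs r) = true
    · have hk : (d.insert (pvFs r) r).keys = ord := by
        rw [PySem.Dict.keys_insert_of_contains d r hc, h]
      simp only [hc, if_true]
      exact ih _ _ hk
    · simp only [Bool.not_eq_true] at hc
      have hk : (d.insert (pvFs r) r).keys = ord ++ [pvFs r] := by
        rw [PySem.Dict.keys_insert_of_not_contains d r hc, h]
      simp only [hc, if_false, Bool.false_eq_true]
      exact ih _ _ hk

-- A's foldl-insert dict holds the last row per key.
theorem pv_getD_foldl (rows : List (List (String × String))) (k : String) :
    ∀ (d : PySem.Dict String (List (String × String))),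
    (rows.foldl (fun d row => d.insert (pvFs row) row) d).getD k []
      = match pvLast? k rows with | some x => x | none => d.getD k [] := by
  induction rows with
  | nil => intro d; rfl
  | cons r rs ih =>
    intro d
    simp only [List.foldl_cons, ih, pvLast?]
    cases pvLast? k rs with
    | some x => rfl
    | none =>
      rw [PySem.Dict.getD_insert]
      by_cases h : k = pvFs r
      · simp [h]
      · have : (pvFs r == k) = false := by
          simp; exact fun hh => h hh.symm
        simp [h, this]

-- B's loop keeps the invariant: out is the first-seen keys mapped through pvG.
theorem pv_B_inv (rows : List (List (String × String))) :
    ∀ (rs : List (List (String × String))), (∀ r ∈ rs, r ∈ rows) →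
    ∀ (seen : List String) (out : List (List (String × String))),
    out = seen.map (pvG rows) →
    (rs.foldl
      (fun (st : List (List (String × String)) × List String) row =>
        let key := pvFs row
        if st.2.contains key then st
        else (st.1 ++ [rows.foldl (fun last r => if pvFs r == key then r else last) row],
              st.2 ++ [key]))
      (out, seen))
    = ((rs.foldl (fun s row => if s.contains (pvFs row) then s else s ++ [pvFs row]) seen).map (pvG rows),
       rs.foldl (fun s row => if s.contains (pvFs row) then s else s ++ [pvFs row]) seen) := by
  intro rs
  induction rs with
  | nil => intro _ seen out h; simp [h]
  | cons r rs ih =>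
    intro hmem seen out h
    have hr : r ∈ rows := hmem r (List.mem_cons_self ..)
    have hrest : ∀ x ∈ rs, x ∈ rows := fun x hx => hmem x (List.mem_cons_of_mem _ hx)
    simp only [List.foldl_cons]
    by_cases hc : seen.contains (pvFs r) = true
    · simp only [hc, if_true]
      exact ih hrest seen out h
    · simp only [hc, Bool.false_eq_true, if_false]
      apply ih hrest
      rw [h, List.map_append, List.map_cons, List.map_nil]
      congr 1
      rw [pv_foldl_last]
      obtain ⟨x, hx⟩ := Option.isSome_iff_exists.mp (pv_last_isSome rows r hr)
      simp [pvG, hx]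

-- the first-occurrence key list is PySem.Set.update [] (rows.map pvFs)
theorem pv_seen_eq_update (rows : List (List (String × String))) (seen : List String) :
    rows.foldl (fun s row => if s.contains (pvFs row) then s else s ++ [pvFs row]) seen
      = PySem.Set.update seen (rows.map pvFs) := by
  simp only [PySem.Set.update, List.foldl_map]
  rfl

-- ===== VERDICT (by name: the statement is the Claim_ definition above) =====
theorem latest_per_feature_py_spec : Claim_equal_latest_per_feature_py := by
  intro rows _ _
  unfold Spec_latest_per_feature_py latest_per_feature_py latest_per_feature_py_alt
  rw [pv_loop_inv rows PySem.Dict.empty [] (by simp),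
      pv_B_inv rows rows (fun _ h => h) [] [] rfl]
  simp only [pv_seen_eq_update,
    PySem.Dict.keys_foldl_insert_key rows pvFs (fun _ r => r) PySem.Dict.empty]
  simp only [PySem.Dict.keys_empty]
  apply List.map_congr_left
  intro k _
  rw [pv_getD_foldl]
  cases h : pvLast? k rows with
  | some x => simp [pvG, h]
  | none => simp [pvG, h, PySem.Dict.getD_empty]
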